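-- pv_equiv track=rewrite | github.com/NT131/attendance_members_flemish_parliament | dash/attendance_statistics.py | get_overall_presence
-- ===== SOURCE A (Python) =====
-- from collections import Counter, defaultdict
--
-- def get_overall_presence(dataframe_attendance_column, fracties_dict):
--     # Initialize a defaultdict to store aggregated counts for each party
--     party_counts = defaultdict(int)
--
--     # Loop through each row of attendance counts
--     for row in dataframe_attendance_column:
--         # Loop through each member and their count in the row
--         for member, count in row:
--             # Match the member's name to their party and accumulate their count
--             for party, members in fracties_dict.items():
--                 if any(member_name == member for member_name, _ in members):
--                     party_counts[party] += count
--                     break  # Stop iterating if the member is found in a party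
--     return dict(party_counts)
-- ===== SOURCE B (Python) =====
-- def get_overall_presence(dataframe_attendance_column, fracties_dict):
--     # Build a member -> party index once (first party wins), then aggregate in
--     # a single pass over the attendance rows with O(1) lookups.
--     member_party = {}
--     for party, members in fracties_dict.items():
--         for member_name, _ in members:
--             member_party.setdefault(member_name, party)
--
--     party_counts = {}
--     for row in dataframe_attendance_column:
--         for member, count in row:
--             party = member_party.get(member)
--             if party is not None:
--                 party_counts[party] = party_counts.get(party, 0) + count
--     return party_counts
-- ===== Notes on version B (the rewrite author's own statement) =====
-- stated objective: faster
-- what changed: B precomputes a member-to-party dict once (first party wins) so the per-occurrence linear scan over all parties' member lists disappears; aggregation is then a single pass with O(1) lookups.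
import Mathlib
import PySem

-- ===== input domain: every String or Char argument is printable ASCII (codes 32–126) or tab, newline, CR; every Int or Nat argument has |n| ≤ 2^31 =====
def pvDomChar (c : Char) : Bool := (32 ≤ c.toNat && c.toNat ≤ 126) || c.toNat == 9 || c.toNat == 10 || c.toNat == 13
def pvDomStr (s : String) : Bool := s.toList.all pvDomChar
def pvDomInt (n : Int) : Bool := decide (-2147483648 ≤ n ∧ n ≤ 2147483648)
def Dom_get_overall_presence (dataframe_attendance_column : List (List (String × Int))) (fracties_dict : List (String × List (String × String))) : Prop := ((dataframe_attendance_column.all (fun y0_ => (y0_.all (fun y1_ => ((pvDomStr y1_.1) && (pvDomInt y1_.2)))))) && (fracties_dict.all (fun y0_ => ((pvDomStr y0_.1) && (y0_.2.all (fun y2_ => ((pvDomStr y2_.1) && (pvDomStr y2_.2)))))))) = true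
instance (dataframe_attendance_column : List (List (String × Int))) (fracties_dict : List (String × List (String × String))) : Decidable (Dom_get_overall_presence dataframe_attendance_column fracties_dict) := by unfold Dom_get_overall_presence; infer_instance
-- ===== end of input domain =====

-- B replaces A's per-occurrence scan over every party's member list with a member→party
-- dict built once (first party wins), making aggregation a single pass with O(1) lookups.

-- ===== PORT A =====
-- A's inner 'for party, members in fracties_dict.items(): if any(...): ...; break' loop:
-- first party whose member list contains `member`, scanning items in order.
def pvFindParty (items : List (String × List (String × String))) (member : String) : Option String :=
  match items with
  | [] => none
  | (party, members) :: rest =>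
    if members.any (fun p => p.1 == member) then some party
    else pvFindParty rest member

def get_overall_presence (dataframe_attendance_column : List (List (String × Int))) (fracties_dict : List (String × List (String × String))) : List (String × Int) :=
  -- fracties_dict is a Python dict: association list → dict at the call boundary
  let fdd : PySem.Dict String (List (String × String)) :=
    fracties_dict.foldl (fun d p => d.insert p.1 p.2) PySem.Dict.empty
  let party_counts : PySem.Dict String Int :=
    dataframe_attendance_column.foldl (fun d row =>
      row.foldl (fun d mc =>
        match pvFindParty fdd.items mc.1 with
        | some party => d.modify party 0 (· + mc.2)   -- party_counts[party] += count (defaultdict)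
        | none => d) d) PySem.Dict.empty
  party_counts.items

-- ===== PORT B =====
def get_overall_presence_alt (dataframe_attendance_column : List (List (String × Int))) (fracties_dict : List (String × List (String × String))) : List (String × Int) :=
  let fdd : PySem.Dict String (List (String × String)) :=
    fracties_dict.foldl (fun d p => d.insert p.1 p.2) PySem.Dict.empty
  -- member_party.setdefault(member_name, party) over all parties' member lists
  let member_party : PySem.Dict String String :=
    fdd.items.foldl (fun m pm =>
      pm.2.foldl (fun m nm => m.setdefault nm.1 pm.1) m) PySem.Dict.empty
  let party_counts : PySem.Dict String Int :=
    dataframe_attendance_column.foldl (fun d row =>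
      row.foldl (fun d mc =>
        match member_party.get? mc.1 with
        | some party => d.insert party (d.getD party 0 + mc.2)
        | none => d) d) PySem.Dict.empty
  party_counts.items

-- ===== PRECONDITION & SPEC =====
def Spec_get_overall_presence (dataframe_attendance_column : List (List (String × Int))) (fracties_dict : List (String × List (String × String))) (out : List (String × Int)) : Prop := out = get_overall_presence_alt dataframe_attendance_column fracties_dict
instance (dataframe_attendance_column : List (List (String × Int))) (fracties_dict : List (String × List (String × String))) (out : List (String × Int)) : Decidable (Spec_get_overall_presence dataframe_attendance_column fracties_dict out) := by unfold Spec_get_overall_presence; infer_instance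

-- ===== CLAIM (what is proved, stated in full; the proofs are below) =====
def Claim_equal_get_overall_presence : Prop := ∀ (dataframe_attendance_column : List (List (String × Int))) (fracties_dict : List (String × List (String × String))), Dom_get_overall_presence dataframe_attendance_column fracties_dict → Spec_get_overall_presence dataframe_attendance_column fracties_dict (get_overall_presence dataframe_attendance_column fracties_dict)

-- ===== LEMMAS AND PROOFS =====

-- setdefault-fold over one member list: lookup is the old binding, else `party` if the list mentions x
lemma mp_members_get (party x : String) :
    ∀ (members : List (String × String)) (m : PySem.Dict String String),
      (members.foldl (fun m nm => m.setdefault nm.1 party) m).get? x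
        = (m.get? x).or (if members.any (fun p => p.1 == x) then some party else none)
  | [], m => by simp
  | nm :: rest, m => by
    rw [List.foldl_cons, mp_members_get party x rest]
    by_cases h : nm.1 = x
    · subst h
      rw [PySem.Dict.get?_setdefault_self]
      cases m.get? nm.1 <;> simp
    · have hg : (m.setdefault nm.1 party).get? x = m.get? x := by
        by_cases hc : m.contains nm.1 = true
        · rw [PySem.Dict.setdefault_of_contains _ _ hc]
        · rw [PySem.Dict.setdefault_of_not_contains _ _ (by simpa using hc),
              PySem.Dict.get?_insert_of_ne _ _ (fun hx => h hx.symm)]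
      rw [hg, List.any_cons]
      have : (nm.1 == x) = false := by simpa using h
      rw [this, Bool.false_or]

-- the whole member→party build: lookup in the built dict = A's first-match party scan
lemma mp_get (x : String) :
    ∀ (items : List (String × List (String × String))) (m : PySem.Dict String String),
      (items.foldl (fun m pm => pm.2.foldl (fun m nm => m.setdefault nm.1 pm.1) m) m).get? x
        = (m.get? x).or (pvFindParty items x)
  | [], m => by simp [pvFindParty]
  | pm :: rest, m => by
    rw [List.foldl_cons, mp_get x rest, mp_members_get]
    cases pm with
    | mk party members =>
      simp only [pvFindParty]
      split
      · cases m.get? x <;> simp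
      · simp

-- ===== VERDICT (by name: the statement is the Claim_ definition above) =====
theorem get_overall_presence_spec : Claim_equal_get_overall_presence := by
  intro dfc fd _
  unfold Spec_get_overall_presence get_overall_presence get_overall_presence_alt
  have hfun : ∀ (fdd : PySem.Dict String (List (String × String))),
      (fun (d : PySem.Dict String Int) (mc : String × Int) =>
        match pvFindParty fdd.items mc.1 with
        | some party => d.modify party 0 (· + mc.2)
        | none => d)
      = (fun (d : PySem.Dict String Int) (mc : String × Int) =>
        match (fdd.items.foldl (fun m pm => pm.2.foldl (fun m nm => m.setdefault nm.1 pm.1) m)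
            PySem.Dict.empty).get? mc.1 with
        | some party => d.insert party (d.getD party 0 + mc.2)
        | none => d) := by
    intro fdd; funext d mc
    rw [mp_get, PySem.Dict.get?_empty, Option.none_or]
    cases pvFindParty fdd.items mc.1 <;> rfl
  simp only [hfun]
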